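-- pv_equiv track=rewrite | github.com/ryoman81/Leetcode-challenge | LeetCode Pattern/3. Backtracking/52_hard_N-Queens_II.py | check
-- ===== SOURCE A (Python) =====
-- def check (sparse, row, col):
--   # check if any queen in the current column
--   for i in range(0, row):
--     if sparse[i] == col:
--       return False
--   # check if any left up position has queen
--   # in C++ types: for (i=row-1, j=col-1; i>=0 && j>=0; i--, j--){}
--   for i, j in zip(range(row-1, -1, -1), range(col-1, -1, -1)):
--     if sparse[i] == j:
--       return False
--   # check if any right up position has queen
--   for i, j in zip(range(row-1, -1, -1), range(col+1, len(sparse), 1)):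
--     if sparse[i] == j:
--       return False
--
--   return True
-- ===== SOURCE B (Python) =====
-- def check(sparse, row, col):
--     # single pass over prior rows: column hit and both diagonals at distance d
--     n = len(sparse)
--     for i in range(row):
--         v = sparse[i]
--         d = row - i
--         if v == col or (col - d >= 0 and v == col - d) or (col + d < n and v == col + d):
--             return False
--     return True
-- ===== Notes on version B (the rewrite author's own statement) =====
-- stated objective: simpler
-- what changed: Replaces the three sequential scans (column loop plus two zip-of-ranges diagonal loops) by a single loop over prior rows checking the column and both diagonals at distance d = row - i, with the same bound guards the ranges imposed.
import Mathlib
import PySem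

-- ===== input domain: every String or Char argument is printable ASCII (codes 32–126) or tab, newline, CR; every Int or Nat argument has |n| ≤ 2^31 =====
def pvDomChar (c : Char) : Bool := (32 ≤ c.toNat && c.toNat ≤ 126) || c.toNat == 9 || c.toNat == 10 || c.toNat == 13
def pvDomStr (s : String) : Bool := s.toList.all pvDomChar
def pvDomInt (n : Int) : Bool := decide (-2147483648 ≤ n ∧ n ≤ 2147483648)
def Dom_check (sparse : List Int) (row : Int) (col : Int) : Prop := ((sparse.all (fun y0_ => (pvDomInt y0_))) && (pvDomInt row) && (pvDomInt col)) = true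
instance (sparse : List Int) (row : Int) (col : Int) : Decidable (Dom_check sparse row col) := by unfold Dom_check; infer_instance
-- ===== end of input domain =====

-- B replaces A's three sequential scans by one loop over prior rows that checks the
-- column and both diagonals at distance d = row - i (objective: simpler).

-- ===== PORT A =====
-- three early-return scans; the two zip(range, range) loops iterate the i-range while
-- carrying j as state, stopping when j leaves its range — exactly Python's lazy zip
def scanDiagDown (sparse : List Int) (l : List Int) (j : Int) : Bool :=
  match l with
  | [] => false
  | i :: rest =>
    if j < 0 then false
    else if PySem.List.pyGetD sparse i 0 == j then true
    else scanDiagDown sparse rest (j - 1)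

def scanDiagUp (sparse : List Int) (n : Int) (l : List Int) (j : Int) : Bool :=
  match l with
  | [] => false
  | i :: rest =>
    if n ≤ j then false
    else if PySem.List.pyGetD sparse i 0 == j then true
    else scanDiagUp sparse n rest (j + 1)

def check (sparse : List Int) (row : Int) (col : Int) : Bool :=
  if (PySem.List.pyRange 0 row 1).any
      (fun i => PySem.List.pyGetD sparse i 0 == col) then false
  else if scanDiagDown sparse (PySem.List.pyRange (row-1) (-1) (-1)) (col-1) then false
  else if scanDiagUp sparse (sparse.length : Int) (PySem.List.pyRange (row-1) (-1) (-1)) (col+1) then false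
  else true

-- ===== PORT B =====
-- single loop with early return, as in Source B
def hitB (sparse : List Int) (n row col i : Int) : Bool :=
  let v := PySem.List.pyGetD sparse i 0
  let d := row - i
  v == col || (decide (col - d ≥ 0) && (v == col - d)) || (decide (col + d < n) && (v == col + d))

def checkAltGo (sparse : List Int) (n row col : Int) : List Int → Bool
  | [] => true
  | i :: rest =>
    if hitB sparse n row col i then false
    else checkAltGo sparse n row col rest

def check_alt (sparse : List Int) (row : Int) (col : Int) : Bool :=
  checkAltGo sparse (sparse.length : Int) row col (PySem.List.pyRange 0 row 1)

-- ===== PRECONDITION & SPEC =====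
-- A indexes sparse[i] for i in range(row): it raises IndexError when row > len(sparse)
def Pre_check (sparse : List Int) (row : Int) (col : Int) : Prop := row ≤ (sparse.length : Int)
instance (sparse : List Int) (row : Int) (col : Int) : Decidable (Pre_check sparse row col) := by unfold Pre_check; infer_instance
def pvWitness_check : List Int × Int × Int := ([1, 3, 0], 2, 2)

def Spec_check (sparse : List Int) (row : Int) (col : Int) (out : Bool) : Prop := out = check_alt sparse row col
instance (sparse : List Int) (row : Int) (col : Int) (out : Bool) : Decidable (Spec_check sparse row col out) := by unfold Spec_check; infer_instance

-- ===== CLAIM =====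
def Claim_equal_check : Prop := ∀ (sparse : List Int) (row : Int) (col : Int), Dom_check sparse row col → Pre_check sparse row col → Spec_check sparse row col (check sparse row col)

-- ===== LEMMAS AND PROOFS =====

lemma zip_range_range (m m' : Nat) :
    (List.range m).zip (List.range m') = (List.range (min m m')).map (fun k => (k, k)) := by
  apply List.ext_getElem
  · simp
  · intro k h1 h2
    simp at h1 ⊢

lemma checkAltGo_eq_any (sparse : List Int) (n row col : Int) (l : List Int) :
    checkAltGo sparse n row col l = !(l.any (hitB sparse n row col)) := by
  induction l with
  | nil => simp [checkAltGo]
  | cons i rest ih =>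
    cases h : hitB sparse n row col i <;> simp [checkAltGo, h, ih]

lemma zip_neg_ranges (row col : Int) :
    (PySem.List.pyRange (row-1) (-1) (-1)).zip (PySem.List.pyRange (col-1) (-1) (-1))
      = (List.range (min row.toNat col.toNat)).map
          (fun (k : Nat) => ((row - 1 - (k : Int), col - 1 - (k : Int)) : Int × Int)) := by
  rw [PySem.List.pyRange_neg_one, PySem.List.pyRange_neg_one, List.zip_map, zip_range_range,
    List.map_map]
  have h1 : (row - 1 - -1) = row := by ring
  have h2 : (col - 1 - -1) = col := by ring
  rw [h1, h2]
  apply List.map_congr_left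
  intro k _
  simp [Prod.map]

lemma zip_neg_pos_ranges (row col b : Int) :
    (PySem.List.pyRange (row-1) (-1) (-1)).zip (PySem.List.pyRange (col+1) b 1)
      = (List.range (min row.toNat (b - (col+1)).toNat)).map
          (fun (k : Nat) => ((row - 1 - (k : Int), col + 1 + (k : Int)) : Int × Int)) := by
  rw [PySem.List.pyRange_neg_one, PySem.List.pyRange_one, List.zip_map, zip_range_range,
    List.map_map]
  have h1 : (row - 1 - -1) = row := by ring
  rw [h1]
  apply List.map_congr_left
  intro k _
  simp [Prod.map]

lemma scanDiagDown_eq_any (sparse : List Int) (l : List Int) (j : Int) :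
    scanDiagDown sparse l j
      = (l.zip (PySem.List.pyRange j (-1) (-1))).any
          (fun p => PySem.List.pyGetD sparse p.1 0 == p.2) := by
  induction l generalizing j with
  | nil => simp [scanDiagDown]
  | cons i rest ih =>
    by_cases hj : j < 0
    · rw [PySem.List.pyRange_neg_one_eq_nil (by omega)]
      simp [scanDiagDown, hj]
    · rw [PySem.List.pyRange_neg_one_cons (by omega)]
      rw [scanDiagDown, if_neg hj]
      cases h : (PySem.List.pyGetD sparse i 0 == j) <;>
        simp [h, ih]

lemma scanDiagUp_eq_any (sparse : List Int) (n : Int) (l : List Int) (j : Int) :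
    scanDiagUp sparse n l j
      = (l.zip (PySem.List.pyRange j n 1)).any
          (fun p => PySem.List.pyGetD sparse p.1 0 == p.2) := by
  induction l generalizing j with
  | nil => simp [scanDiagUp]
  | cons i rest ih =>
    by_cases hj : n ≤ j
    · rw [PySem.List.pyRange_one_eq_nil (by omega)]
      simp [scanDiagUp, hj]
    · rw [PySem.List.pyRange_one_cons (by omega)]
      rw [scanDiagUp, if_neg hj]
      cases h : (PySem.List.pyGetD sparse i 0 == j) <;>
        simp [h, ih]

lemma ite3_eq_not_or (x y z : Bool) :
    (if x then false else if y then false else if z then false else true) = !(x || y || z) := by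
  cases x <;> cases y <;> cases z <;> rfl

theorem check_eq_alt (sparse : List Int) (row col : Int) :
    check sparse row col = check_alt sparse row col := by
  unfold check check_alt
  rw [ite3_eq_not_or, checkAltGo_eq_any, scanDiagDown_eq_any, scanDiagUp_eq_any]
  rw [zip_neg_ranges, zip_neg_pos_ranges]
  congr 1
  rw [Bool.eq_iff_iff]
  simp only [List.any_map, List.any_eq_true, List.mem_range, PySem.List.mem_pyRange_one,
    Function.comp, hitB, Bool.or_eq_true, Bool.and_eq_true, beq_iff_eq, decide_eq_true_eq,
    ge_iff_le]
  constructor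
  · rintro ((⟨i, ⟨h0, hr⟩, hc⟩ | ⟨k, hk, h2⟩) | ⟨k, hk, h2⟩)
    · exact ⟨i, ⟨h0, hr⟩, Or.inl (Or.inl hc)⟩
    · refine ⟨row - 1 - (k : Int), by omega, Or.inl (Or.inr ⟨by omega, ?_⟩)⟩
      rw [show col - (row - (row - 1 - (k : Int))) = col - 1 - (k : Int) from by ring]
      exact h2
    · refine ⟨row - 1 - (k : Int), by omega, Or.inr ⟨by omega, ?_⟩⟩
      rw [show col + (row - (row - 1 - (k : Int))) = col + 1 + (k : Int) from by ring]
      exact h2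
  · rintro ⟨i, ⟨h0, hr⟩, (hc | ⟨hd, hc⟩) | ⟨hd, hc⟩⟩
    · exact Or.inl (Or.inl ⟨i, ⟨h0, hr⟩, hc⟩)
    · refine Or.inl (Or.inr ⟨(row - 1 - i).toNat, by omega, ?_⟩)
      have e1 : (((row - 1 - i).toNat : Nat) : Int) = row - 1 - i := by omega
      rw [e1, show row - 1 - (row - 1 - i) = i from by ring,
        show col - 1 - (row - 1 - i) = col - (row - i) from by ring]
      exact hc
    · refine Or.inr ⟨(row - 1 - i).toNat, by omega, ?_⟩
      have e1 : (((row - 1 - i).toNat : Nat) : Int) = row - 1 - i := by omega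
      rw [e1, show row - 1 - (row - 1 - i) = i from by ring,
        show col + 1 + (row - 1 - i) = col + (row - i) from by ring]
      exact hc

-- ===== VERDICT =====
theorem check_spec : Claim_equal_check := by
  intro sparse row col _ _
  unfold Spec_check
  exact check_eq_alt sparse row col
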